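-- pv_equiv track=rewrite | github.com/Muryor/mynote | tools/utils/preprocess_ocr_markdown.py | fix_multiline_dollar_math
-- ===== SOURCE A (Python) =====
-- def fix_multiline_dollar_math(text: str) -> str:
--     r"""
--     修复跨行的 $ 数学公式。
--
--     OCR 有时会把显示数学写成：
--     $
--     公式内容
--     $
--
--     这应该改成：
--     $$
--     公式内容
--     $$
--     """
--     lines = text.split('\n')
--     result = []
--     i = 0
--
--     while i < len(lines):
--         line = lines[i]
--         stripped = line.strip()
--
--         # 检测单独一行的 $（不是 $$）
--         if stripped == '$':
--             # 检查这是否是多行数学的开始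
--             # 向后找，看是否有对应的结束 $
--             j = i + 1
--             math_content = []
--             found_end = False
--
--             while j < len(lines):
--                 next_stripped = lines[j].strip()
--                 if next_stripped == '$':
--                     found_end = True
--                     break
--                 elif next_stripped == '$$':
--                     # 可能是格式混乱，不处理
--                     break
--                 else:
--                     math_content.append(lines[j])
--                     j += 1
--
--             if found_end and math_content:
--                 # 转换为 $$...$$ 格式
--                 result.append('$$')
--                 result.extend(math_content)
--                 result.append('$$')
--                 i = j + 1  # 跳过结束的 $
--                 continue
--
--         result.append(line)
--         i += 1
--
--     return '\n'.join(result)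
-- ===== SOURCE B (Python) =====
-- def fix_multiline_dollar_math(text: str) -> str:
--     # Single forward pass with a small state machine instead of nested scans.
--     result = []
--     in_math = False
--     open_line = None
--     buffer = []
--     for line in text.split('\n'):
--         stripped = line.strip()
--         if not in_math:
--             if stripped == '$':
--                 in_math = True
--                 open_line = line
--                 buffer = []
--             else:
--                 result.append(line)
--         else:
--             if stripped == '$$':
--                 result.append(open_line)
--                 result.extend(buffer)
--                 result.append(line)
--                 in_math = False
--             elif stripped == '$':
--                 if buffer:
--                     result.append('$$')
--                     result.extend(buffer)
--                     result.append('$$')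
--                     in_math = False
--                 else:
--                     result.append(open_line)
--                     open_line = line
--             else:
--                 buffer.append(line)
--     if in_math:
--         result.append(open_line)
--         result.extend(buffer)
--     return '\n'.join(result)
-- ===== Notes on version B (the rewrite author's own statement) =====
-- stated objective: simpler
-- what changed: Replaced A's nested while-loops (outer scan plus an inner forward re-scan for the closing '$' from every candidate opener) by a single forward pass with an in-math state machine (saved open line + content buffer) and an end-of-input flush.
import Mathlib
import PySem

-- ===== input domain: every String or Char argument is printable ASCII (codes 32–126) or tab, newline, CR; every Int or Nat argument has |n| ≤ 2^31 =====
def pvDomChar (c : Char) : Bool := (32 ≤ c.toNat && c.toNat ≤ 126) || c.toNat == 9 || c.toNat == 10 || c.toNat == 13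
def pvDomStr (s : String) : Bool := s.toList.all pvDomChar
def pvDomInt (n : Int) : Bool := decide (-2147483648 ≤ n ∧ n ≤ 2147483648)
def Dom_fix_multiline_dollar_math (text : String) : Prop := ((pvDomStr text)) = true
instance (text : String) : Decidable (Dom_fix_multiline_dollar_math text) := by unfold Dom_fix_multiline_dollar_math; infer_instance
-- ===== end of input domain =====

-- B replaces A's nested re-scanning while loops by a single forward pass with
-- an in-math state (open line + buffer); same return value, simpler decomposition.

-- ===== PORT A =====
-- inner while loop of A: scan forward from position i+1 for a closing '$';
-- returns (math_content, rest after the closing '$') if found before a '$$'/EOF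
def pvFindEnd : List String → Option (List String × List String)
  | [] => none
  | l :: ls =>
    if PySem.Str.strip l = "$" then some ([], ls)
    else if PySem.Str.strip l = "$$" then none
    else
      match pvFindEnd ls with
      | some (c, r) => some (l :: c, r)
      | none => none

theorem pvFindEnd_length : ∀ (ls c r : List String), pvFindEnd ls = some (c, r) → r.length < ls.length := by
  intro ls
  induction ls with
  | nil => intro c r h; simp [pvFindEnd] at h
  | cons l ls ih =>
    intro c r h
    simp only [pvFindEnd] at h
    split_ifs at h with h1 h2
    · cases h; simp
    · cases hfe : pvFindEnd ls with
      | none => rw [hfe] at h; cases h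
      | some p =>
        rw [hfe] at h
        cases h
        have := ih p.1 p.2 (by rw [hfe])
        simpa using Nat.lt_succ_of_lt this

-- outer while loop of A
def pvGoA : List String → List String
  | [] => []
  | l :: ls =>
    if PySem.Str.strip l = "$" then
      match hfe : pvFindEnd ls with
      | some (c, r) =>
        if c ≠ [] then "$$" :: (c ++ "$$" :: pvGoA r)
        else l :: pvGoA ls
      | none => l :: pvGoA ls
    else l :: pvGoA ls
termination_by ls => ls.length
decreasing_by
  · exact Nat.lt_succ_of_lt (pvFindEnd_length _ _ _ hfe)
  · simp
  · simp
  · simp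

def fix_multiline_dollar_math (text : String) : String :=
  PySem.Str.join "\n" (pvGoA ((PySem.Str.split? text "\n").getD []))

-- ===== PORT B =====
-- Source B's single for-loop with accumulator `res`; the in-math state is
-- none = not in math, some (open_line, buffer) = in math.
def pvGoB : List String → List String → Option (String × List String) → List String
  | [], res, none => res
  | [], res, some (o, buf) => res ++ o :: buf
  | l :: ls, res, none =>
    if PySem.Str.strip l = "$" then pvGoB ls res (some (l, []))
    else pvGoB ls (res ++ [l]) none
  | l :: ls, res, some (o, buf) =>
    if PySem.Str.strip l = "$$" then pvGoB ls (res ++ (o :: buf) ++ [l]) none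
    else if PySem.Str.strip l = "$" then
      if buf ≠ [] then pvGoB ls (res ++ "$$" :: (buf ++ ["$$"])) none
      else pvGoB ls (res ++ [o]) (some (l, []))
    else pvGoB ls res (some (o, buf ++ [l]))

def fix_multiline_dollar_math_alt (text : String) : String :=
  PySem.Str.join "\n" (pvGoB ((PySem.Str.split? text "\n").getD []) [] none)

-- ===== PRECONDITION & SPEC =====
def Spec_fix_multiline_dollar_math (text : String) (out : String) : Prop := out = fix_multiline_dollar_math_alt text
instance (text : String) (out : String) : Decidable (Spec_fix_multiline_dollar_math text out) := by unfold Spec_fix_multiline_dollar_math; infer_instance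

-- ===== CLAIM (what is proved, stated in full; the proofs are below) =====
def Claim_equal_fix_multiline_dollar_math : Prop := ∀ (text : String), Dom_fix_multiline_dollar_math text → Spec_fix_multiline_dollar_math text (fix_multiline_dollar_math text)

-- ===== LEMMAS AND PROOFS =====

-- equation lemmas for pvGoA (well-founded recursion hides the definitional ones)
theorem pvGoA_nil : pvGoA [] = [] := by rw [pvGoA]

theorem pvGoA_cons_plain (l : String) (ls : List String) (h : PySem.Str.strip l ≠ "$") :
    pvGoA (l :: ls) = l :: pvGoA ls := by
  rw [pvGoA, if_neg h]

theorem pvGoA_cons_none (l : String) (ls : List String) (h : PySem.Str.strip l = "$")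
    (hfe : pvFindEnd ls = none) : pvGoA (l :: ls) = l :: pvGoA ls := by
  rw [pvGoA, if_pos h]
  split
  · rename_i heq; rw [hfe] at heq; cases heq
  · rfl

theorem pvGoA_cons_some_nil (l : String) (ls r : List String) (h : PySem.Str.strip l = "$")
    (hfe : pvFindEnd ls = some ([], r)) : pvGoA (l :: ls) = l :: pvGoA ls := by
  rw [pvGoA, if_pos h]
  split
  · rename_i c r' heq
    rw [hfe] at heq
    cases heq
    simp
  · rename_i heq
    rw [hfe] at heq

theorem pvGoA_cons_some (l : String) (ls c r : List String) (h : PySem.Str.strip l = "$")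
    (hfe : pvFindEnd ls = some (c, r)) (hc : c ≠ []) :
    pvGoA (l :: ls) = "$$" :: (c ++ "$$" :: pvGoA r) := by
  rw [pvGoA, if_pos h]
  split
  · rename_i c' r' heq
    rw [hfe] at heq
    cases heq
    rw [if_pos hc]
  · rename_i heq; rw [hfe] at heq; cases heq

-- a "plain" line is neither a lone '$' nor a lone '$$' after stripping
def pvPlain (ls : List String) : Prop :=
  ∀ l ∈ ls, PySem.Str.strip l ≠ "$" ∧ PySem.Str.strip l ≠ "$$"

theorem pvPlain_tail {b : String} {buf : List String} (h : pvPlain (b :: buf)) : pvPlain buf :=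
  fun l hl => h l (List.mem_cons_of_mem _ hl)

theorem pvFindEnd_plain_append (buf ls : List String) (h : pvPlain buf) :
    pvFindEnd (buf ++ ls) = (pvFindEnd ls).map (fun p => (buf ++ p.1, p.2)) := by
  induction buf with
  | nil => simp [Option.map_id']
  | cons b buf ih =>
    have hb := h b (by simp)
    simp only [List.cons_append, pvFindEnd, if_neg hb.1, if_neg hb.2, ih (pvPlain_tail h)]
    cases pvFindEnd ls with
    | none => simp
    | some p => simp

theorem pvGoA_plain_append (buf ls : List String) (h : pvPlain buf) :
    pvGoA (buf ++ ls) = buf ++ pvGoA ls := by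
  induction buf with
  | nil => simp
  | cons b buf ih =>
    have hb := h b (by simp)
    rw [List.cons_append, pvGoA_cons_plain b _ hb.1, ih (pvPlain_tail h)]
    rfl

theorem pvGoB_eq_pvGoA : ∀ (n : Nat) (ls : List String), ls.length ≤ n →
    (∀ res, pvGoB ls res none = res ++ pvGoA ls) ∧
    (∀ res o buf, pvPlain buf → PySem.Str.strip o = "$" →
      pvGoB ls res (some (o, buf)) = res ++ pvGoA (o :: (buf ++ ls))) := by
  intro n
  induction n with
  | zero =>
    intro ls hls
    have : ls = [] := List.eq_nil_of_length_eq_zero (Nat.le_zero.mp hls)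
    subst this
    constructor
    · intro res; simp [pvGoB, pvGoA_nil]
    · intro res o buf hbuf ho
      have hfe : pvFindEnd buf = none := by
        have := pvFindEnd_plain_append buf [] hbuf
        simpa [pvFindEnd] using this
      have h4 : pvGoA buf = buf := by simpa [pvGoA_nil] using pvGoA_plain_append buf [] hbuf
      simp only [pvGoB, List.append_nil]
      rw [pvGoA_cons_none o buf ho hfe, h4]
  | succ n ih =>
    intro ls hls
    cases ls with
    | nil => exact ih [] (Nat.zero_le _)
    | cons l ls =>
      have hlen : ls.length ≤ n := Nat.le_of_succ_le_succ hls
      constructor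
      · intro res
        by_cases h1 : PySem.Str.strip l = "$"
        · rw [pvGoB, if_pos h1, (ih ls hlen).2 res l [] (by intro x hx; cases hx) h1]
          simp
        · rw [pvGoB, if_neg h1, (ih ls hlen).1 (res ++ [l]), pvGoA_cons_plain l ls h1]
          simp
      · intro res o buf hbuf ho
        by_cases h2 : PySem.Str.strip l = "$$"
        · have h1 : PySem.Str.strip l ≠ "$" := by rw [h2]; decide
          have hfe : pvFindEnd (buf ++ l :: ls) = none := by
            rw [pvFindEnd_plain_append buf _ hbuf]
            simp [pvFindEnd, if_neg h1, if_pos h2]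
          rw [pvGoB, if_pos h2, (ih ls hlen).1 (res ++ (o :: buf) ++ [l]),
            pvGoA_cons_none o _ ho hfe, pvGoA_plain_append buf _ hbuf,
            pvGoA_cons_plain l ls h1]
          simp
        · by_cases h1 : PySem.Str.strip l = "$"
          · have hfe : pvFindEnd (buf ++ l :: ls) = some (buf, ls) := by
              rw [pvFindEnd_plain_append buf _ hbuf]
              simp [pvFindEnd, if_pos h1]
            rcases eq_or_ne buf [] with h3 | h3
            · subst h3
              rw [pvGoB, if_neg h2, if_pos h1, if_neg (by simp),
                (ih ls hlen).2 (res ++ [o]) l [] (by intro x hx; cases hx) h1,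
                pvGoA_cons_some_nil o _ ls ho (by simpa using hfe)]
              simp
            · rw [pvGoB, if_neg h2, if_pos h1, if_pos h3,
                (ih ls hlen).1 (res ++ "$$" :: (buf ++ ["$$"])),
                pvGoA_cons_some o _ buf ls ho hfe h3]
              simp
          · have hplain : pvPlain (buf ++ [l]) := by
              intro x hx
              rcases List.mem_append.mp hx with hx | hx
              · exact hbuf x hx
              · simp at hx; subst hx; exact ⟨h1, h2⟩
            rw [pvGoB, if_neg h2, if_neg h1,
              (ih ls hlen).2 res o (buf ++ [l]) hplain ho]
            simp

-- ===== VERDICT (by name: the statement is the Claim_ definition above) =====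
theorem fix_multiline_dollar_math_spec : Claim_equal_fix_multiline_dollar_math := by
  intro text _
  unfold Spec_fix_multiline_dollar_math fix_multiline_dollar_math fix_multiline_dollar_math_alt
  rw [(pvGoB_eq_pvGoA ((PySem.Str.split? text "\n").getD []).length _ le_rfl).1 []]
  simp
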